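-- pv_equiv track=rewrite | github.com/MadDinosaur/AdventOfCode2020 | Day5.py | convert
-- ===== SOURCE A (Python) =====
-- def convert(row, column):
--     new_boarding_pass = ""
--     for i in range(7):
--         if row & 0b1000000:
--             new_boarding_pass += "B"
--         else:
--             new_boarding_pass += "F"
--         row = row << 1
--     for i in range(3):
--         if column & 0b100:
--             new_boarding_pass += "R"
--         else:
--             new_boarding_pass += "L"
--         column = column << 1
--     return new_boarding_pass
-- ===== SOURCE B (Python) =====
-- _ROW_TR = str.maketrans("01", "FB")
-- _COL_TR = str.maketrans("01", "LR")
--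
-- def convert(row, column):
--     return format(row & 0x7F, '07b').translate(_ROW_TR) + \
--            format(column & 0x7, '03b').translate(_COL_TR)
-- ===== Notes on version B (the rewrite author's own statement) =====
-- stated objective: idiomatic
-- what changed: Replaces A's two shift-and-test loops building the string character by character with masking each argument to its low 7/3 bits, formatting as fixed-width binary, and translating the digits to F/B and L/R.
import Mathlib
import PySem

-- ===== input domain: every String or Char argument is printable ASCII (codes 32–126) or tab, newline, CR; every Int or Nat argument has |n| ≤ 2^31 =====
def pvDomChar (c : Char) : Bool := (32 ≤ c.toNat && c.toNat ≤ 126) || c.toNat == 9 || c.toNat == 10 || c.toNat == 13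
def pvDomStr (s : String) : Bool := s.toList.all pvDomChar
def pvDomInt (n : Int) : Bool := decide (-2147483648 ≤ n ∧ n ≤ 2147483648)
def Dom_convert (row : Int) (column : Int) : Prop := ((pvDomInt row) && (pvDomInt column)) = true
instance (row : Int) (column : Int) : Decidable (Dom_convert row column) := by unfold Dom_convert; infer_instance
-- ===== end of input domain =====

-- B replaces A's bit-shifting loops with mask + fixed-width binary rendering + digit translation (idiomatic; same cost).


-- ===== PORT A =====
-- 'for i in range(7): … row = row << 1' as the obvious fuel recursion over (string, row)
def rowLoop : Nat → String × Int → String × Int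
  | 0, st => st
  | n + 1, (s, row) =>
    rowLoop n (s ++ (if PySem.Int.band row 64 ≠ 0 then "B" else "F"), row <<< 1)

def colLoop : Nat → String × Int → String × Int
  | 0, st => st
  | n + 1, (s, column) =>
    colLoop n (s ++ (if PySem.Int.band column 4 ≠ 0 then "R" else "L"), column <<< 1)

def convert (row : Int) (column : Int) : String :=
  (colLoop 3 ((rowLoop 7 ("", row)).1, column)).1

-- ===== PORT B =====
-- format(n, '0{w}b'): the w binary digits of n, MSB first (exact for n < 2^w, which the masks guarantee)
def fmtBin (n : Nat) (w : Nat) : List Char :=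
  (List.range w).map (fun i => if n.testBit (w - 1 - i) then '1' else '0')

-- str.translate table {'0': 'F', '1': 'B'}
def trRow (c : Char) : Char := if c = '0' then 'F' else if c = '1' then 'B' else c
-- str.translate table {'0': 'L', '1': 'R'}
def trCol (c : Char) : Char := if c = '0' then 'L' else if c = '1' then 'R' else c

def convert_alt (row : Int) (column : Int) : String :=
  String.ofList ((fmtBin (PySem.Int.band row 127).toNat 7).map trRow
    ++ (fmtBin (PySem.Int.band column 7).toNat 3).map trCol)

-- ===== PRECONDITION & SPEC =====
def Spec_convert (row : Int) (column : Int) (out : String) : Prop := out = convert_alt row column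
instance (row : Int) (column : Int) (out : String) : Decidable (Spec_convert row column out) := by unfold Spec_convert; infer_instance

-- ===== CLAIM (what is proved, stated in full; the proofs are below) =====
def Claim_equal_convert : Prop := ∀ (row : Int) (column : Int), Dom_convert row column → Spec_convert row column (convert row column)

-- ===== LEMMAS AND PROOFS =====
theorem natBit64 (n : Nat) : n &&& 64 = n % 128 - n % 64 := by
  have h : n &&& 2^6 = (n.testBit 6).toNat * 2^6 := Nat.and_two_pow n 6
  rw [Nat.testBit_eq_decide_div_mod_eq] at h
  norm_num at h
  by_cases hc : n / 64 % 2 = 1 <;> simp [hc] at h <;> omega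

theorem natBit4 (n : Nat) : n &&& 4 = n % 8 - n % 4 := by
  have h : n &&& 2^2 = (n.testBit 2).toNat * 2^2 := Nat.and_two_pow n 2
  rw [Nat.testBit_eq_decide_div_mod_eq] at h
  norm_num at h
  by_cases hc : n / 4 % 2 = 1 <;> simp [hc] at h <;> omega

theorem band64 (a : Int) : PySem.Int.band a 64 = a % 128 - a % 64 := by
  unfold PySem.Int.band
  split_ifs with h h2 h2
  · have := natBit64 a.toNat; simp only [show ((64:Int)).toNat = 64 from rfl] at *; omega
  · omega
  · have := natBit64 ((-a-1).toNat)
    rw [Nat.and_comm] at this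
    simp only [show ((64:Int)).toNat = 64 from rfl] at *; omega
  · omega

theorem band4 (a : Int) : PySem.Int.band a 4 = a % 8 - a % 4 := by
  unfold PySem.Int.band
  split_ifs with h h2 h2
  · have := natBit4 a.toNat; simp only [show ((4:Int)).toNat = 4 from rfl] at *; omega
  · omega
  · have := natBit4 ((-a-1).toNat)
    rw [Nat.and_comm] at this
    simp only [show ((4:Int)).toNat = 4 from rfl] at *; omega
  · omega

theorem band127 (a : Int) : PySem.Int.band a 127 = a % 128 := by
  unfold PySem.Int.band
  split_ifs with h h2 h2
  · have h3 : a.toNat &&& 127 = a.toNat % 128 := Nat.and_two_pow_sub_one_eq_mod _ 7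
    simp only [show ((127:Int)).toNat = 127 from rfl] at *; omega
  · omega
  · have h3 : 127 &&& (-a-1).toNat = (-a-1).toNat % 128 := by
      rw [Nat.and_comm]; exact Nat.and_two_pow_sub_one_eq_mod _ 7
    simp only [show ((127:Int)).toNat = 127 from rfl] at *; omega
  · omega

theorem band7 (a : Int) : PySem.Int.band a 7 = a % 8 := by
  unfold PySem.Int.band
  split_ifs with h h2 h2
  · have h3 : a.toNat &&& 7 = a.toNat % 8 := Nat.and_two_pow_sub_one_eq_mod _ 3
    simp only [show ((7:Int)).toNat = 7 from rfl] at *; omega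
  · omega
  · have h3 : 7 &&& (-a-1).toNat = (-a-1).toNat % 8 := by
      rw [Nat.and_comm]; exact Nat.and_two_pow_sub_one_eq_mod _ 3
    simp only [show ((7:Int)).toNat = 7 from rfl] at *; omega
  · omega

theorem int_shl1 (a : Int) : a <<< 1 = a * 2 := by
  have := Int.shiftLeft_eq_mul_pow a 1
  simpa using this

theorem rowLoop_congr : ∀ (n : Nat) (s : String) (x y : Int),
    x % 128 = y % 128 → (rowLoop n (s, x)).1 = (rowLoop n (s, y)).1 := by
  intro n
  induction n with
  | zero => intro s x y _; rfl
  | succ n ih =>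
    intro s x y h
    simp only [rowLoop]
    rw [band64 x, band64 y]
    have hx : x % 64 = y % 64 := by omega
    rw [h, hx, int_shl1, int_shl1]
    exact ih _ _ _ (by omega)

theorem colLoop_congr : ∀ (n : Nat) (s : String) (x y : Int),
    x % 8 = y % 8 → (colLoop n (s, x)).1 = (colLoop n (s, y)).1 := by
  intro n
  induction n with
  | zero => intro s x y _; rfl
  | succ n ih =>
    intro s x y h
    simp only [colLoop]
    rw [band4 x, band4 y]
    have hx : x % 4 = y % 4 := by omega
    rw [h, hx, int_shl1, int_shl1]
    exact ih _ _ _ (by omega)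

theorem convert_congr (a c : Int) :
    convert a c = convert (a % 128) (c % 8) := by
  unfold convert
  have h1 : (rowLoop 7 ("", a)).1 = (rowLoop 7 ("", a % 128)).1 :=
    rowLoop_congr 7 "" a (a % 128) (by omega)
  have h2 : ∀ s : String, (colLoop 3 (s, c)).1 = (colLoop 3 (s, c % 8)).1 := fun s =>
    colLoop_congr 3 s c (c % 8) (by omega)
  rw [h1, h2]

set_option maxRecDepth 100000 in
theorem small_cases : ∀ u : Nat, u < 128 → ∀ v : Nat, v < 8 →
    convert (u : Int) (v : Int) = convert_alt (u : Int) (v : Int) := by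
  decide

-- ===== VERDICT (by name: the statement is the Claim_ definition above) =====
theorem convert_spec : Claim_equal_convert := by
  intro row column _
  unfold Spec_convert
  have hr : row % 128 = ((row % 128).toNat : Int) := by omega
  have hc : column % 8 = ((column % 8).toNat : Int) := by omega
  have hA := convert_congr row column
  have hB : convert_alt row column = convert_alt (row % 128) (column % 8) := by
    unfold convert_alt
    rw [band127, band7, band127, band7,
        show row % 128 % 128 = row % 128 by omega,
        show column % 8 % 8 = column % 8 by omega]
  rw [hA, hB, hr, hc]
  exact small_cases _ (by omega) _ (by omega)
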